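-- pv_equiv track=rewrite | github.com/govpat/rosalind | scripts/test_rosalind_samples.py | validate_sseq
-- ===== SOURCE A (Python) =====
-- def parse_fasta(dataset: str):
--     seqs = []
--     cur = []
--     for raw in dataset.splitlines():
--         line = raw.strip()
--         if not line:
--             continue
--         if line.startswith('>'):
--             if cur:
--                 seqs.append(''.join(cur))
--                 cur = []
--         else:
--             cur.append(line)
--     if cur:
--         seqs.append(''.join(cur))
--     return seqs
--
-- def validate_sseq(dataset: str, got: str) -> bool:
--     seqs = parse_fasta(dataset)
--     if len(seqs) != 2:
--         return False
--     s, t = seqs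
--     try:
--         idx = [int(x) for x in got.split()]
--     except ValueError:
--         return False
--     if len(idx) != len(t):
--         return False
--     if any(i < 1 or i > len(s) for i in idx):
--         return False
--     if any(idx[i] >= idx[i + 1] for i in range(len(idx) - 1)):
--         return False
--     return ''.join(s[i - 1] for i in idx) == t
-- ===== SOURCE B (Python) =====
-- def parse_fasta(dataset: str):
--     seqs = []
--     cur = []
--     for raw in dataset.splitlines():
--         line = raw.strip()
--         if not line:
--             continue
--         if line.startswith('>'):
--             if cur:
--                 seqs.append(''.join(cur))
--                 cur = []
--         else:
--             cur.append(line)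
--     if cur:
--         seqs.append(''.join(cur))
--     return seqs
--
-- def validate_sseq(dataset: str, got: str) -> bool:
--     seqs = parse_fasta(dataset)
--     if len(seqs) != 2:
--         return False
--     s, t = seqs
--     try:
--         idx = [int(x) for x in got.split()]
--     except ValueError:
--         return False
--     if len(idx) != len(t):
--         return False
--     # Merge scan: walk s left-to-right once, consuming (index, expected-char)
--     # pairs from the front of a work list whenever the scan position reaches
--     # the next claimed index.  Out-of-range, non-increasing or duplicate
--     # indices are simply never consumed, so the final emptiness test subsumes
--     # A's separate bounds and monotonicity passes.
--     pairs = list(zip(idx, t))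
--     for p, ch in enumerate(s, start=1):
--         if pairs and pairs[0][0] == p:
--             if pairs[0][1] != ch:
--                 return False
--             pairs = pairs[1:]
--     return not pairs
-- ===== Notes on version B (the rewrite author's own statement) =====
-- stated objective: alternative
-- what changed: Instead of A's three passes over the index list (bounds any, adjacent-pair monotonicity any, join-and-compare), B does one merge scan over the sequence s itself, consuming a zip(idx, t) work list from the front whenever the scan position reaches the next claimed index; out-of-range, non-increasing or duplicate indices are never consumed, so the final emptiness test subsumes the bounds and monotonicity checks.
import Mathlib
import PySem

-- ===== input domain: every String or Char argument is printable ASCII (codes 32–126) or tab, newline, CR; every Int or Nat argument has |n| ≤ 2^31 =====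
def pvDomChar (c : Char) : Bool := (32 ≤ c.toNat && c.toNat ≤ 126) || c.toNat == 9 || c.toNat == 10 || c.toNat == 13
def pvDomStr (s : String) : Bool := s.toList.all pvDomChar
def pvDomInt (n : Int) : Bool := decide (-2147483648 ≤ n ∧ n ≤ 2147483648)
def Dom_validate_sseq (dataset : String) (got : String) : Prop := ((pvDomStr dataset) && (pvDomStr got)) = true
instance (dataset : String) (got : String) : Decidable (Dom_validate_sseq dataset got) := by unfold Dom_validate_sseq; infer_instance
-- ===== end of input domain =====

-- B replaces A's three passes over the index list (bounds, monotonicity, join-compare) by a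
-- single merge scan over the sequence s that consumes a (index, expected char) work list;
-- same asymptotic cost, return value only.

-- ===== PORT A =====
-- shared helper: parse_fasta is identical source code in both Pythons (strings as List Char)
def parse_fasta_port (dataset : String) : List (List Char) :=
  let st := (PySem.Chars.splitlines dataset.toList).foldl
    (fun (st : List (List Char) × List (List Char)) raw =>
      let line := PySem.Chars.strip raw
      if line = [] then st
      else if PySem.Chars.startswith line ['>'] then
        if st.2 ≠ [] then (st.1 ++ [st.2.flatten], []) else st
      else (st.1, st.2 ++ [line]))
    ([], [])
  if st.2 ≠ [] then st.1 ++ [st.2.flatten] else st.1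

def validate_sseq (dataset : String) (got : String) : Bool :=
  match parse_fasta_port dataset with
  | [s, t] =>
    -- [int(x) for x in got.split()] with ValueError → False
    match (PySem.Chars.split₀ got.toList).mapM PySem.Int.ofChars? with
    | none => false
    | some idx =>
      if idx.length ≠ t.length then false
      else if idx.any (fun i => decide (i < 1) || decide ((s.length : Int) < i)) then false
      else if (PySem.List.pyRange 0 ((idx.length : Int) - 1) 1).any
          (fun k => decide (PySem.List.pyGetD idx (k + 1) 0 ≤ PySem.List.pyGetD idx k 0)) then false
      else decide (idx.map (fun i => PySem.List.pyGetD s (i - 1) ' ') = t)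
  | _ => false

-- ===== PORT B =====
-- parse_fasta is the identical source code in both Pythons; B gets its own copy of the helper
def parse_fasta_alt (dataset : String) : List (List Char) :=
  let st := (PySem.Chars.splitlines dataset.toList).foldl
    (fun (st : List (List Char) × List (List Char)) raw =>
      let line := PySem.Chars.strip raw
      if line = [] then st
      else if PySem.Chars.startswith line ['>'] then
        if st.2 ≠ [] then (st.1 ++ [st.2.flatten], []) else st
      else (st.1, st.2 ++ [line]))
    ([], [])
  if st.2 ≠ [] then st.1 ++ [st.2.flatten] else st.1

-- the merge scan of Source B: 'for p, ch in enumerate(s, start=1)' consuming the front of pairs;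
-- at the end 'return not pairs'
def sseq_scan : List Char → Int → List (Int × Char) → Bool
  | [], _, pairs => decide (pairs = [])
  | _ :: rest, p, [] => sseq_scan rest (p + 1) []
  | ch :: rest, p, (i, tc) :: prest =>
    if i = p then
      if tc ≠ ch then false
      else sseq_scan rest (p + 1) prest
    else sseq_scan rest (p + 1) ((i, tc) :: prest)

def validate_sseq_alt (dataset : String) (got : String) : Bool :=
  let seqs := parse_fasta_alt dataset
  if seqs.length = 2 then
    let s := seqs.getD 0 []
    let t := seqs.getD 1 []
    match (PySem.Chars.split₀ got.toList).mapM PySem.Int.ofChars? with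
    | some idx =>
      if idx.length = t.length then sseq_scan s 1 (idx.zip t) else false
    | none => false
  else false

-- ===== PRECONDITION & SPEC =====
def Spec_validate_sseq (dataset : String) (got : String) (out : Bool) : Prop := out = validate_sseq_alt dataset got
instance (dataset : String) (got : String) (out : Bool) : Decidable (Spec_validate_sseq dataset got out) := by unfold Spec_validate_sseq; infer_instance

-- ===== CLAIM (what is proved, stated in full; the proofs are below) =====
def Claim_equal_validate_sseq : Prop := ∀ (dataset : String) (got : String), Dom_validate_sseq dataset got → Spec_validate_sseq dataset got (validate_sseq dataset got)

-- ===== LEMMAS AND PROOFS =====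

-- what the merge scan accepts: the pending indices are strictly increasing, lie in the
-- window still to be scanned, and each names the character its pair expects
def ScanCond (ss : List Char) (p : Int) (pairs : List (Int × Char)) : Prop :=
  List.Pairwise (· < ·) (pairs.map Prod.fst) ∧
  (∀ q ∈ pairs, p ≤ q.1 ∧ q.1 ≤ p - 1 + ss.length) ∧
  (∀ q ∈ pairs, ss.getD (q.1 - p).toNat ' ' = q.2)

theorem getD_shift (ch : Char) (rest : List Char) (p x : Int) (h : p + 1 ≤ x) :
    (ch :: rest).getD (x - p).toNat ' ' = rest.getD (x - (p + 1)).toNat ' ' := by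
  have hx : (x - p).toNat = (x - (p + 1)).toNat + 1 := by omega
  rw [hx, List.getD_cons_succ]

theorem scan_iff : ∀ (ss : List Char) (p : Int) (pairs : List (Int × Char)),
    sseq_scan ss p pairs = true ↔ ScanCond ss p pairs := by
  intro ss
  induction ss with
  | nil =>
    intro p pairs
    cases pairs with
    | nil => simp [sseq_scan, ScanCond]
    | cons q prest =>
      unfold ScanCond
      simp only [sseq_scan, decide_eq_true_eq]
      constructor
      · intro h; exact absurd h (by simp)
      · rintro ⟨_, hb, _⟩
        exfalso
        have h2 := hb q List.mem_cons_self
        simp only [List.length_nil] at h2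
        omega
  | cons ch rest ih =>
    intro p pairs
    cases pairs with
    | nil =>
      simp only [sseq_scan]
      rw [ih]
      unfold ScanCond
      simp
    | cons q prest =>
      obtain ⟨i, tc⟩ := q
      simp only [sseq_scan]
      by_cases hi : i = p
      · subst hi
        rw [if_pos rfl]
        by_cases htc : tc = ch
        · subst htc
          rw [if_neg (by simp), ih]
          unfold ScanCond
          constructor
          · rintro ⟨hpw, hb, hc⟩
            refine ⟨?_, ?_, ?_⟩
            · simp only [List.map_cons, List.pairwise_cons]
              exact ⟨fun a ha => by
                obtain ⟨q, hq, rfl⟩ := List.mem_map.mp ha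
                have := hb q hq; omega,
                hpw⟩
            · intro q hq
              rcases List.mem_cons.mp hq with rfl | hq
              · simp only [List.length_cons]; omega
              · have := hb q hq; simp only [List.length_cons]; omega
            · intro q hq
              rcases List.mem_cons.mp hq with rfl | hq
              · simp only [sub_self, Int.toNat_zero, List.getD_cons_zero]
              · have hge := (hb q hq).1
                rw [getD_shift tc rest i q.1 hge]
                exact hc q hq
          · rintro ⟨hpw, hb, hc⟩
            simp only [List.map_cons, List.pairwise_cons] at hpw
            refine ⟨hpw.2, ?_, ?_⟩
            · intro q hq
              have hlt : i < q.1 := hpw.1 q.1 (List.mem_map.mpr ⟨q, hq, rfl⟩)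
              have := (hb q (List.mem_cons_of_mem _ hq)).2
              simp only [List.length_cons] at this ⊢; omega
            · intro q hq
              have hlt : i < q.1 := hpw.1 q.1 (List.mem_map.mpr ⟨q, hq, rfl⟩)
              rw [← getD_shift tc rest i q.1 (by omega)]
              exact hc q (List.mem_cons_of_mem _ hq)
        · rw [if_pos (by simpa using htc)]
          unfold ScanCond
          constructor
          · intro h; exact absurd h (by simp)
          · rintro ⟨_, _, hc⟩
            have := hc (i, tc) List.mem_cons_self
            simp only [sub_self, Int.toNat_zero, List.getD_cons_zero] at this
            exact (htc this.symm).elim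
      · rw [if_neg hi, ih]
        unfold ScanCond
        constructor
        · rintro ⟨hpw, hb, hc⟩
          refine ⟨hpw, ?_, ?_⟩
          · intro q hq
            have := hb q hq; simp at this ⊢; omega
          · intro q hq
            have hge := (hb q hq).1
            rw [getD_shift ch rest p q.1 hge]
            exact hc q hq
        · rintro ⟨hpw, hb, hc⟩
          refine ⟨hpw, ?_, ?_⟩
          · intro q hq
            have hb' := hb q hq
            simp only [List.length_cons] at hb'
            rcases List.mem_cons.mp hq with rfl | hq'
            · constructor
              · omega
              · omega
            · have hhead : (i : Int) < q.1 := by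
                simp only [List.map_cons, List.pairwise_cons] at hpw
                exact hpw.1 q.1 (List.mem_map.mpr ⟨q, hq', rfl⟩)
              have hip : p ≤ i := (hb (i, tc) List.mem_cons_self).1
              constructor
              · omega
              · omega
          · intro q hq
            have hge : p + 1 ≤ q.1 := by
              rcases List.mem_cons.mp hq with rfl | hq'
              · have := (hb (i, tc) List.mem_cons_self).1; omega
              · have hhead : (i : Int) < q.1 := by
                  simp only [List.map_cons, List.pairwise_cons] at hpw
                  exact hpw.1 q.1 (List.mem_map.mpr ⟨q, hq', rfl⟩)
                have hip : p ≤ i := (hb (i, tc) List.mem_cons_self).1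
                omega
            rw [← getD_shift ch rest p q.1 hge]
            exact hc q hq

-- zip-pointwise equality equals map equality (lengths equal)
theorem zip_forall_eq_map {α β : Type} (f : α → β) :
    ∀ (xs : List α) (ys : List β), xs.length = ys.length →
      ((∀ q ∈ xs.zip ys, f q.1 = q.2) ↔ xs.map f = ys) := by
  intro xs
  induction xs with
  | nil => intro ys h; cases ys <;> simp at h ⊢
  | cons x xs ih =>
    intro ys h
    cases ys with
    | nil => simp at h
    | cons y ys =>
      simp only [List.zip_cons_cons, List.map_cons, List.cons_eq_cons, List.forall_mem_cons]
      rw [ih ys (by simpa using h)]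

-- characterisation of A's monotonicity pass
theorem mono_any_iff (idx : List Int) :
    ((PySem.List.pyRange 0 ((idx.length : Int) - 1) 1).any
        (fun k => decide (PySem.List.pyGetD idx (k + 1) 0 ≤ PySem.List.pyGetD idx k 0)) = false) ↔
      List.Pairwise (· < ·) idx := by
  rw [← List.isChain_iff_pairwise, List.isChain_iff_getElem]
  cases idx with
  | nil => simp [PySem.List.pyRange]
  | cons x xs =>
    have hcast : ((x :: xs).length : Int) - 1 = ((xs.length : Nat) : Int) := by
      simp
    rw [hcast, PySem.List.pyRange_zero_natCast]
    rw [List.any_map, List.any_eq_false]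
    constructor
    · intro h k hk
      have hmem : k ∈ List.range xs.length := List.mem_range.mpr (by simpa using hk)
      have := h k hmem
      simp only [Function.comp] at this
      have h1 : PySem.List.pyGetD (x :: xs) ((k : Int)) 0 = (x :: xs).getD k 0 :=
        PySem.List.pyGetD_natCast _ _ _
      have h2 : PySem.List.pyGetD (x :: xs) ((k : Int) + 1) 0 = (x :: xs).getD (k + 1) 0 := by
        have : ((k : Int) + 1) = (((k + 1 : Nat)) : Int) := by push_cast; ring
        rw [this]; exact PySem.List.pyGetD_natCast _ _ _
      rw [h1, h2] at this
      rw [List.getD_eq_getElem _ _ (by simpa using hk),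
        List.getD_eq_getElem _ _ (by simp; omega)] at this
      simpa using this
    · intro h k hmem
      have hk : k + 1 < (x :: xs).length := by
        simp only [List.mem_range] at hmem; simp; omega
      have := h k hk
      simp only [Function.comp]
      have h1 : PySem.List.pyGetD (x :: xs) ((k : Int)) 0 = (x :: xs).getD k 0 :=
        PySem.List.pyGetD_natCast _ _ _
      have h2 : PySem.List.pyGetD (x :: xs) ((k : Int) + 1) 0 = (x :: xs).getD (k + 1) 0 := by
        have : ((k : Int) + 1) = (((k + 1 : Nat)) : Int) := by push_cast; ring
        rw [this]; exact PySem.List.pyGetD_natCast _ _ _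
      rw [h1, h2]
      rw [List.getD_eq_getElem _ _ (by omega), List.getD_eq_getElem _ _ (by omega)]
      simpa using this

-- A's three passes, as one proposition
theorem a_tail_iff (s t : List Char) (idx : List Int) :
    ((if idx.any (fun i => decide (i < 1) || decide ((s.length : Int) < i)) then false
      else if (PySem.List.pyRange 0 ((idx.length : Int) - 1) 1).any
          (fun k => decide (PySem.List.pyGetD idx (k + 1) 0 ≤ PySem.List.pyGetD idx k 0)) then false
      else decide (idx.map (fun i => PySem.List.pyGetD s (i - 1) ' ') = t)) = true) ↔
    ((∀ i ∈ idx, 1 ≤ i ∧ i ≤ (s.length : Int)) ∧ List.Pairwise (· < ·) idx ∧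
      idx.map (fun i => PySem.List.pyGetD s (i - 1) ' ') = t) := by
  split_ifs with hb hm
  · simp only [false_iff]
    rintro ⟨hall, _, _⟩
    obtain ⟨i, hi, hcond⟩ := List.any_eq_true.mp hb
    have := hall i hi
    simp only [Bool.or_eq_true, decide_eq_true_eq] at hcond
    omega
  · simp only [false_iff]
    rintro ⟨_, hpw, _⟩
    rw [← mono_any_iff idx] at hpw
    rw [hpw] at hm
    exact Bool.false_ne_true hm
  · rw [Bool.not_eq_true, List.any_eq_false] at hb
    rw [Bool.not_eq_true, mono_any_iff] at hm
    simp only [decide_eq_true_eq]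
    constructor
    · intro h
      refine ⟨?_, hm, h⟩
      intro i hi
      have := hb i hi
      simp only [Bool.or_eq_true, decide_eq_true_eq, not_or] at this
      omega
    · rintro ⟨_, _, h⟩; exact h

-- B's merge scan, instantiated, matches the same proposition
theorem b_tail_iff (s t : List Char) (idx : List Int) (hl : idx.length = t.length) :
    (sseq_scan s 1 (idx.zip t) = true) ↔
    ((∀ i ∈ idx, 1 ≤ i ∧ i ≤ (s.length : Int)) ∧ List.Pairwise (· < ·) idx ∧
      idx.map (fun i => PySem.List.pyGetD s (i - 1) ' ') = t) := by
  rw [scan_iff]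
  unfold ScanCond
  have hfst : (idx.zip t).map Prod.fst = idx := List.map_fst_zip (by omega)
  have hmem : ∀ q ∈ idx.zip t, q.1 ∈ idx := by
    intro q hq
    rw [← hfst]; exact List.mem_map.mpr ⟨q, hq, rfl⟩
  have hmem' : ∀ i ∈ idx, ∃ q ∈ idx.zip t, q.1 = i := by
    intro i hi
    rw [← hfst] at hi
    obtain ⟨q, hq, rfl⟩ := List.mem_map.mp hi
    exact ⟨q, hq, rfl⟩
  have hbnd : (∀ q ∈ idx.zip t, (1 : Int) ≤ q.1 ∧ q.1 ≤ 1 - 1 + s.length) ↔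
      (∀ i ∈ idx, 1 ≤ i ∧ i ≤ (s.length : Int)) := by
    constructor
    · intro h i hi
      obtain ⟨q, hq, rfl⟩ := hmem' i hi
      have := h q hq; omega
    · intro h q hq
      have := h q.1 (hmem q hq); omega
  rw [hfst]
  constructor
  · rintro ⟨hpw, hb, hc⟩
    refine ⟨hbnd.mp hb, hpw, ?_⟩
    rw [← zip_forall_eq_map (fun i => PySem.List.pyGetD s (i - 1) ' ') idx t hl]
    intro q hq
    have h1 : (1 : Int) ≤ q.1 := (hb q hq).1
    have hpg : PySem.List.pyGetD s (q.1 - 1) ' ' = s.getD (q.1 - 1).toNat ' ' := by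
      have he : q.1 - 1 = (((q.1 - 1).toNat : Nat) : Int) := by omega
      rw [he]; exact PySem.List.pyGetD_natCast _ _ _
    rw [hpg]
    exact hc q hq
  · rintro ⟨hall, hpw, hmap⟩
    refine ⟨hpw, hbnd.mpr hall, ?_⟩
    have hz := (zip_forall_eq_map (fun i => PySem.List.pyGetD s (i - 1) ' ') idx t hl).mpr hmap
    intro q hq
    have h1 : (1 : Int) ≤ q.1 := (hall q.1 (hmem q hq)).1
    have hpg : PySem.List.pyGetD s (q.1 - 1) ' ' = s.getD (q.1 - 1).toNat ' ' := by
      have he : q.1 - 1 = (((q.1 - 1).toNat : Nat) : Int) := by omega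
      rw [he]; exact PySem.List.pyGetD_natCast _ _ _
    rw [← hpg]
    exact hz q hq

-- ===== VERDICT (by name: the statement is the Claim_ definition above) =====
-- the two Pythons contain the same parse_fasta source; the two Lean copies are definitionally equal
theorem parse_fasta_alt_eq (dataset : String) : parse_fasta_alt dataset = parse_fasta_port dataset := rfl

theorem validate_sseq_spec : Claim_equal_validate_sseq := by
  intro dataset got _
  unfold Spec_validate_sseq validate_sseq validate_sseq_alt
  rw [parse_fasta_alt_eq]
  cases h : parse_fasta_port dataset with
  | nil => rfl
  | cons s rest =>
    cases rest with
    | nil => rfl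
    | cons t rest2 =>
      cases rest2 with
      | nil =>
        simp only [List.length_cons, List.length_nil, List.getD_cons_zero,
          List.getD_cons_succ]
        cases hm : (PySem.Chars.split₀ got.toList).mapM PySem.Int.ofChars? with
        | none => rfl
        | some idx =>
          dsimp only
          simp only [if_true]
          by_cases hl : idx.length = t.length
          · rw [if_neg (not_not_intro hl), if_pos hl, Bool.eq_iff_iff,
              a_tail_iff s t idx, b_tail_iff s t idx hl]
          · simp [hl]
      | cons u rest3 => rw [if_neg (by simp)]
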